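-- pv_equiv track=rewrite | github.com/cjquines/compprog | gcj/gcj-2020/r1a2.py | solve
-- ===== SOURCE A (Python) =====
-- def br(x, y): return (x+1, y+1)
--
-- def bl(x, y): return (x+1, y)
--
-- def ri(x, y): return (x, y+1)
--
-- def le(x, y): return (x, y-1)
--
-- def solve(n):
--     s = bin(n)
--     bits = [i for i in range(1, n.bit_length() + 1) if s[-i] == "1"]
--     cur = (1, 1)
--     res = [cur]
--     for i in bits:
--         while cur[0] != i:
--             if cur[1] == 1:
--                 cur = bl(*cur)
--                 res.append(cur)
--             else:
--                 cur = br(*cur)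
--                 res.append(cur)
--         if cur[1] == 1:
--             while cur[1] != cur[0]:
--                 cur = ri(*cur)
--                 res.append(cur)
--         else:
--             while cur[1] != 1:
--                 cur = le(*cur)
--                 res.append(cur)
--     return res
-- ===== SOURCE B (Python) =====
-- def solve(n):
--     s = bin(n)
--     bits = {i for i in range(1, n.bit_length() + 1) if s[-i] == "1"}
--     res = [(1, 1)]
--     y = 1
--     side_left = True
--     last = max(bits) if bits else 1
--     for r in range(2, last + 1):
--         # one descent step into row r: column 1 on the left side, the diagonal on the right
--         y = 1 if side_left else y + 1
--         res.append((r, y))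
--         if r in bits:
--             if side_left:
--                 res.extend((r, c) for c in range(2, r + 1))
--                 y = r
--             else:
--                 res.extend((r, c) for c in range(y - 1, 0, -1))
--                 y = 1
--             side_left = not side_left
--     return res
-- ===== Notes on version B (the rewrite author's own statement) =====
-- stated objective: alternative
-- what changed: A walks bit by bit with nested descent/sweep while-loops restarted per set bit; B makes a single pass over the rows 2..max(bits) carrying a side flag, emitting one descent step per row and a horizontal sweep on set-bit rows.
import Mathlib
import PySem

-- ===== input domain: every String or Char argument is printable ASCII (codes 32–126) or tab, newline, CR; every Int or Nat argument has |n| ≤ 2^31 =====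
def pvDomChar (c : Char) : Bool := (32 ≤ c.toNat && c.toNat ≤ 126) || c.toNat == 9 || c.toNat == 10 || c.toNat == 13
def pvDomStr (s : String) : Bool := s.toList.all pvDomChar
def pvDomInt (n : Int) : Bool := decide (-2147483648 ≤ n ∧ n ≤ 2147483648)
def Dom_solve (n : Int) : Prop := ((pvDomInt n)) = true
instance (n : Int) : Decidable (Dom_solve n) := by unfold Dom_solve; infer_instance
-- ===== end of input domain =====

-- B replaces A's outer loop over set bits with nested descent/sweep while-loops by a single
-- pass over the rows carrying a side flag (objective: alternative decomposition, same cost).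

-- ===== PORT A =====
def br (x y : Int) : Int × Int := (x + 1, y + 1)
def bl (x y : Int) : Int × Int := (x + 1, y)
def ri (x y : Int) : Int × Int := (x, y + 1)
def el (x y : Int) : Int × Int := (x, y - 1)   -- Python's `le` (renamed: `le` collides with Lean)

-- `while cur[0] != i: bl/br` (the guard x < i only makes the loop total; on every reachable
-- state of A the loop runs with x ≤ i, where both agree with Python)
def descendA (i x y : Int) (res : List (Int × Int)) : (Int × Int) × List (Int × Int) :=
  if x < i then
    if y = 1 then descendA i (bl x y).1 (bl x y).2 (res ++ [bl x y])
    else descendA i (br x y).1 (br x y).2 (res ++ [br x y])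
  else ((x, y), res)
termination_by (i - x).toNat
decreasing_by all_goals simp [bl, br]; omega

-- `while cur[1] != cur[0]: ri` (totality guard y < x, same remark)
def sweepRiA (x y : Int) (res : List (Int × Int)) : (Int × Int) × List (Int × Int) :=
  if y < x then sweepRiA (ri x y).1 (ri x y).2 (res ++ [ri x y]) else ((x, y), res)
termination_by (x - y).toNat
decreasing_by simp [ri]; omega

-- `while cur[1] != 1: le` (totality guard 1 < y, same remark)
def sweepLeA (x y : Int) (res : List (Int × Int)) : (Int × Int) × List (Int × Int) :=
  if 1 < y then sweepLeA (el x y).1 (el x y).2 (res ++ [el x y]) else ((x, y), res)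
termination_by (y - 1).toNat
decreasing_by simp [el]; omega

-- body of A's `for i in bits` loop
def astep (acc : (Int × Int) × List (Int × Int)) (i : Int) : (Int × Int) × List (Int × Int) :=
  let d := descendA i acc.1.1 acc.1.2 acc.2
  if d.1.2 = 1 then sweepRiA d.1.1 d.1.2 d.2 else sweepLeA d.1.1 d.1.2 d.2

def solve (n : Int) : List (Int × Int) :=
  let s := PySem.Int.pyBin n
  let bits : List Int :=
    (PySem.List.pyRange 1 ((PySem.Int.bitLength n : Int) + 1) 1).filter
      (fun i => PySem.Str.pyGet? s (-i) == some '1')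
  (bits.foldl astep ((1, 1), [(1, 1)])).2

-- ===== PORT B =====
-- body of B's `for r in range(2, last + 1)` loop: one descent step, then a sweep on set-bit rows
def bstep (bits : PySem.Set Int) (st : Int × Bool × List (Int × Int)) (r : Int) :
    Int × Bool × List (Int × Int) :=
  let y := if st.2.1 then 1 else st.1 + 1
  let res := st.2.2 ++ [(r, y)]
  if PySem.Set.contains bits r then
    if st.2.1 then (r, false, res ++ (PySem.List.pyRange 2 (r + 1) 1).map (fun c => (r, c)))
    else (1, true, res ++ (PySem.List.pyRange (y - 1) 0 (-1)).map (fun c => (r, c)))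
  else (y, st.2.1, res)

def solve_alt (n : Int) : List (Int × Int) :=
  let s := PySem.Int.pyBin n
  let bits : PySem.Set Int :=
    PySem.Set.ofList
      ((PySem.List.pyRange 1 ((PySem.Int.bitLength n : Int) + 1) 1).filter
        (fun i => PySem.Str.pyGet? s (-i) == some '1'))
  let last : Int :=
    match PySem.List.max? bits (fun x => x) with
    | some m => m
    | none => 1
  ((PySem.List.pyRange 2 (last + 1) 1).foldl (bstep bits) (1, true, [(1, 1)])).2.2

-- ===== PRECONDITION & SPEC =====
def Spec_solve (n : Int) (out : List (Int × Int)) : Prop := out = solve_alt n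
instance (n : Int) (out : List (Int × Int)) : Decidable (Spec_solve n out) := by
  unfold Spec_solve; infer_instance

-- ===== CLAIM (what is proved, stated in full; the proofs are below) =====
def Claim_equal_solve : Prop := ∀ (n : Int), Dom_solve n → Spec_solve n (solve n)

-- ===== LEMMAS AND PROOFS =====

theorem descendA_left (i : Int) : ∀ (x : Int) (res : List (Int × Int)), x ≤ i →
    descendA i x 1 res =
      ((i, 1), res ++ (PySem.List.pyRange (x + 1) (i + 1) 1).map (fun r => (r, (1 : Int)))) := by
  have h : ∀ (k : Nat) (x : Int) (res : List (Int × Int)), x ≤ i → (i - x).toNat = k →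
      descendA i x 1 res =
        ((i, 1), res ++ (PySem.List.pyRange (x + 1) (i + 1) 1).map (fun r => (r, (1 : Int)))) := by
    intro k
    induction k with
    | zero =>
      intro x res hx hk
      have hxi : x = i := by omega
      subst hxi
      rw [descendA]
      simp [PySem.List.pyRange_one_eq_nil (by omega : i + 1 ≤ i + 1)]
    | succ k ih =>
      intro x res hx hk
      have hlt : x < i := by omega
      rw [descendA, if_pos hlt, if_pos rfl]
      simp only [bl]
      rw [ih (x + 1) _ (by omega) (by omega)]
      rw [PySem.List.pyRange_one_cons (by omega : x + 1 < i + 1)]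
      simp
  intro x res hx
  exact h _ x res hx rfl

theorem descendA_right (i : Int) : ∀ (x : Int) (res : List (Int × Int)), 2 ≤ x → x ≤ i →
    descendA i x x res =
      ((i, i), res ++ (PySem.List.pyRange (x + 1) (i + 1) 1).map (fun r => (r, r))) := by
  have h : ∀ (k : Nat) (x : Int) (res : List (Int × Int)), 2 ≤ x → x ≤ i → (i - x).toNat = k →
      descendA i x x res =
        ((i, i), res ++ (PySem.List.pyRange (x + 1) (i + 1) 1).map (fun r => (r, r))) := by
    intro k
    induction k with
    | zero =>
      intro x res h2 hx hk
      have hxi : x = i := by omega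
      subst hxi
      rw [descendA]
      simp [PySem.List.pyRange_one_eq_nil (by omega : i + 1 ≤ i + 1)]
    | succ k ih =>
      intro x res h2 hx hk
      have hlt : x < i := by omega
      rw [descendA, if_pos hlt, if_neg (by omega : ¬ x = 1)]
      simp only [br]
      rw [ih (x + 1) _ (by omega) (by omega) (by omega)]
      rw [PySem.List.pyRange_one_cons (by omega : x + 1 < i + 1)]
      simp
  intro x res h2 hx
  exact h _ x res h2 hx rfl

theorem sweepRiA_eq (x : Int) : ∀ (y : Int) (res : List (Int × Int)), y ≤ x →
    sweepRiA x y res =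
      ((x, x), res ++ (PySem.List.pyRange (y + 1) (x + 1) 1).map (fun c => (x, c))) := by
  have h : ∀ (k : Nat) (y : Int) (res : List (Int × Int)), y ≤ x → (x - y).toNat = k →
      sweepRiA x y res =
        ((x, x), res ++ (PySem.List.pyRange (y + 1) (x + 1) 1).map (fun c => (x, c))) := by
    intro k
    induction k with
    | zero =>
      intro y res hy hk
      have hxy : y = x := by omega
      subst hxy
      rw [sweepRiA]
      simp [PySem.List.pyRange_one_eq_nil (by omega : y + 1 ≤ y + 1)]
    | succ k ih =>
      intro y res hy hk
      have hlt : y < x := by omega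
      rw [sweepRiA, if_pos hlt]
      simp only [ri]
      rw [ih (y + 1) _ (by omega) (by omega)]
      rw [PySem.List.pyRange_one_cons (by omega : y + 1 < x + 1)]
      simp
  intro y res hy
  exact h _ y res hy rfl

theorem sweepLeA_eq (x : Int) : ∀ (y : Int) (res : List (Int × Int)), 1 ≤ y →
    sweepLeA x y res =
      ((x, 1), res ++ (PySem.List.pyRange (y - 1) 0 (-1)).map (fun c => (x, c))) := by
  have h : ∀ (k : Nat) (y : Int) (res : List (Int × Int)), 1 ≤ y → (y - 1).toNat = k →
      sweepLeA x y res =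
        ((x, 1), res ++ (PySem.List.pyRange (y - 1) 0 (-1)).map (fun c => (x, c))) := by
    intro k
    induction k with
    | zero =>
      intro y res hy hk
      have hy1 : y = 1 := by omega
      subst hy1
      rw [sweepLeA]
      simp [PySem.List.pyRange_neg_one_eq_nil]
    | succ k ih =>
      intro y res hy hk
      have hlt : 1 < y := by omega
      rw [sweepLeA, if_pos hlt]
      simp only [el]
      rw [ih (y - 1) _ (by omega) (by omega)]
      rw [PySem.List.pyRange_neg_one_cons (by omega : (0:Int) < y - 1)]
      simp
  intro y res hy
  exact h _ y res hy rfl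

theorem bfold_left (bits : PySem.Set Int) : ∀ (a b : Int) (res : List (Int × Int)),
    (∀ r ∈ PySem.List.pyRange a b 1, r ∉ bits) →
    (PySem.List.pyRange a b 1).foldl (bstep bits) (1, true, res) =
      (1, true, res ++ (PySem.List.pyRange a b 1).map (fun r => (r, (1 : Int)))) := by
  intro a b res hnb
  have h : ∀ (k : Nat) (a : Int) (res : List (Int × Int)),
      (∀ r ∈ PySem.List.pyRange a b 1, r ∉ bits) → (b - a).toNat = k →
      (PySem.List.pyRange a b 1).foldl (bstep bits) (1, true, res) =
        (1, true, res ++ (PySem.List.pyRange a b 1).map (fun r => (r, (1 : Int)))) := by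
    intro k
    induction k with
    | zero =>
      intro a res hnb hk
      rw [PySem.List.pyRange_one_eq_nil (by omega : b ≤ a)]
      simp
    | succ k ih =>
      intro a res hnb hk
      have hab : a < b := by omega
      rw [PySem.List.pyRange_one_cons hab] at hnb ⊢
      have ha : a ∉ bits := hnb a (List.mem_cons_self ..)
      have hc : PySem.Set.contains bits a = false := by
        cases hcc : PySem.Set.contains bits a with
        | false => rfl
        | true => exact absurd ((PySem.Set.contains_iff bits a).mp hcc) ha
      simp only [List.foldl_cons, List.map_cons]
      have hstep : bstep bits (1, true, res) a = (1, true, res ++ [(a, (1 : Int))]) := by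
        simp [bstep, ha]
      rw [hstep, ih (a + 1) _ (fun r hr => hnb r (List.mem_cons_of_mem _ hr)) (by omega)]
      simp
  exact h _ a res hnb rfl

theorem bfold_right (bits : PySem.Set Int) : ∀ (a b : Int) (res : List (Int × Int)),
    a ≤ b → (∀ r ∈ PySem.List.pyRange a b 1, r ∉ bits) →
    (PySem.List.pyRange a b 1).foldl (bstep bits) (a - 1, false, res) =
      (b - 1, false, res ++ (PySem.List.pyRange a b 1).map (fun r => (r, r))) := by
  intro a b res hab hnb
  have h : ∀ (k : Nat) (a : Int) (res : List (Int × Int)), a ≤ b →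
      (∀ r ∈ PySem.List.pyRange a b 1, r ∉ bits) → (b - a).toNat = k →
      (PySem.List.pyRange a b 1).foldl (bstep bits) (a - 1, false, res) =
        (b - 1, false, res ++ (PySem.List.pyRange a b 1).map (fun r => (r, r))) := by
    intro k
    induction k with
    | zero =>
      intro a res hab hnb hk
      have : a = b := by omega
      subst this
      rw [PySem.List.pyRange_one_eq_nil (by omega : a ≤ a)]
      simp
    | succ k ih =>
      intro a res hab hnb hk
      have hab' : a < b := by omega
      rw [PySem.List.pyRange_one_cons hab'] at hnb ⊢
      have ha : a ∉ bits := hnb a (List.mem_cons_self ..)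
      have hc : PySem.Set.contains bits a = false := by
        cases hcc : PySem.Set.contains bits a with
        | false => rfl
        | true => exact absurd ((PySem.Set.contains_iff bits a).mp hcc) ha
      simp only [List.foldl_cons, List.map_cons]
      have hstep : bstep bits (a - 1, false, res) a = (a, false, res ++ [(a, a)]) := by
        simp [bstep, ha, show a - 1 + 1 = a by omega]
      rw [hstep]
      have := ih (a + 1) (res ++ [(a, a)]) (by omega)
        (fun r hr => hnb r (List.mem_cons_of_mem _ hr)) (by omega)
      simp only [show a + 1 - 1 = a by omega] at this
      rw [this]
      simp
  exact h _ a res hab hnb rfl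

theorem bstep_hit_left (bits : PySem.Set Int) (b : Int) (res : List (Int × Int))
    (hb : b ∈ bits) :
    bstep bits (1, true, res) b =
      (b, false, (res ++ [(b, 1)]) ++ (PySem.List.pyRange 2 (b + 1) 1).map (fun c => (b, c))) := by
  have hc : PySem.Set.contains bits b = true := (PySem.Set.contains_iff bits b).mpr hb
  simp [bstep, hb, List.append_assoc]

theorem bstep_hit_right (bits : PySem.Set Int) (b : Int) (res : List (Int × Int))
    (hb : b ∈ bits) :
    bstep bits (b - 1, false, res) b =
      (1, true, (res ++ [(b, b)]) ++ (PySem.List.pyRange (b - 1) 0 (-1)).map (fun c => (b, c))) := by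
  have hc : PySem.Set.contains bits b = true := (PySem.Set.contains_iff bits b).mpr hb
  simp [bstep, hb, show b - 1 + 1 = b by omega, List.append_assoc]

theorem main_lemma (bits : PySem.Set Int) :
    ∀ (bs : List Int) (x : Int) (side : Bool) (res : List (Int × Int)) (M : Int),
    bs.Pairwise (· < ·) →
    (∀ r, r ∈ bs ↔ r ∈ bits ∧ x < r) →
    (side = false → 2 ≤ x) → 1 ≤ x →
    (bs = [] → M ≤ x) → (bs ≠ [] → M ∈ bs ∧ ∀ r ∈ bs, r ≤ M) →
    (bs.foldl astep ((x, if side then 1 else x), res)).2 =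
      ((PySem.List.pyRange (x + 1) (M + 1) 1).foldl (bstep bits)
        ((if side then 1 else x), side, res)).2.2 := by
  intro bs
  induction bs with
  | nil =>
    intro x side res M _ _ _ hx hMnil _
    rw [PySem.List.pyRange_one_eq_nil (by have := hMnil rfl; omega : M + 1 ≤ x + 1)]
    simp
  | cons b bs ih =>
    intro x side res M hs hmem hside hx hMnil hM
    obtain ⟨hMmem, hMub⟩ := hM (by simp)
    obtain ⟨hbbit, hxb⟩ := (hmem b).mp (List.mem_cons_self ..)
    have hbM : b ≤ M := hMub b (List.mem_cons_self ..)
    have hlt : ∀ r ∈ bs, b < r := (List.pairwise_cons.mp hs).1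
    have hs' : bs.Pairwise (· < ·) := (List.pairwise_cons.mp hs).2
    have hnb : ∀ r ∈ PySem.List.pyRange (x + 1) b 1, r ∉ bits := by
      intro r hr hrb
      have hr' := (PySem.List.mem_pyRange_one).mp hr
      rcases List.mem_cons.mp ((hmem r).mpr ⟨hrb, by omega⟩) with h | h
      · omega
      · exact absurd (hlt r h) (by omega)
    have hmem' : ∀ r, r ∈ bs ↔ r ∈ bits ∧ b < r := by
      intro r
      constructor
      · intro hr
        exact ⟨((hmem r).mp (List.mem_cons_of_mem _ hr)).1, hlt r hr⟩
      · rintro ⟨h1, h2⟩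
        rcases List.mem_cons.mp ((hmem r).mpr ⟨h1, by omega⟩) with h | h
        · omega
        · exact h
    have hMnil' : bs = [] → M ≤ b := by
      intro hbs
      subst hbs
      simp at hMmem
      omega
    have hM' : bs ≠ [] → M ∈ bs ∧ ∀ r ∈ bs, r ≤ M := by
      intro hbs
      refine ⟨?_, fun r hr => hMub r (List.mem_cons_of_mem _ hr)⟩
      rcases List.mem_cons.mp hMmem with h | h
      · obtain ⟨r, hr⟩ := List.exists_mem_of_ne_nil bs hbs
        have h1 := hlt r hr
        have h2 := hMub r (List.mem_cons_of_mem _ hr)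
        omega
      · exact h
    rw [PySem.List.pyRange_one_append (x + 1) (b + 1) (M + 1) (by omega) (by omega),
        List.foldl_append,
        PySem.List.pyRange_one_succ_right (by omega : x + 1 ≤ b),
        List.foldl_append]
    simp only [List.foldl_cons, List.foldl_nil]
    cases side with
    | true =>
      rw [show (if (true : Bool) = true then (1 : Int) else x) = 1 from rfl]
      rw [bfold_left bits (x + 1) b res hnb, bstep_hit_left bits b _ hbbit]
      have hAstep : astep ((x, 1), res) b =
          ((b, b), ((res ++ (PySem.List.pyRange (x + 1) b 1).map (fun r => (r, (1 : Int)))) ++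
              [(b, (1 : Int))]) ++
            (PySem.List.pyRange 2 (b + 1) 1).map (fun c => (b, c))) := by
        simp only [astep, descendA_left b x res (by omega)]
        rw [if_pos trivial, sweepRiA_eq b 1 _ (by omega),
            PySem.List.pyRange_one_succ_right (by omega : x + 1 ≤ b)]
        norm_num [List.append_assoc]
      rw [hAstep]
      exact ih b false _ M hs' hmem' (fun _ => by omega) (by omega) hMnil' hM'
    | false =>
      have h2x : 2 ≤ x := hside rfl
      rw [show (if (false : Bool) = true then (1 : Int) else x) = x from rfl]
      have hbr := bfold_right bits (x + 1) b res (by omega) hnb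
      rw [show x + 1 - 1 = x by omega] at hbr
      rw [hbr, bstep_hit_right bits b _ hbbit]
      have hAstep : astep ((x, x), res) b =
          ((b, 1), ((res ++ (PySem.List.pyRange (x + 1) b 1).map (fun r => (r, r))) ++
              [(b, b)]) ++
            (PySem.List.pyRange (b - 1) 0 (-1)).map (fun c => (b, c))) := by
        simp only [astep, descendA_right b x res h2x (by omega)]
        rw [if_neg (by omega : ¬ b = 1), sweepLeA_eq b b _ (by omega),
            PySem.List.pyRange_one_succ_right (by omega : x + 1 ≤ b)]
        norm_num [List.append_assoc]
      rw [hAstep]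
      exact ih b true _ M hs' hmem' (fun h => nomatch h) (by omega) hMnil' hM'


theorem astep_one (res : List (Int × Int)) : astep ((1, 1), res) 1 = ((1, 1), res) := by
  have hd : descendA 1 1 1 res = ((1, 1), res) := by
    rw [descendA]; simp
  simp only [astep, hd]
  rw [if_pos trivial, sweepRiA]
  simp

theorem top_eq (p : Int → Bool) (L : Int) (hL : 0 ≤ L) :
    (((PySem.List.pyRange 1 (L + 1) 1).filter p).foldl astep ((1, 1), [(1, 1)])).2 =
    ((PySem.List.pyRange 2
        ((match PySem.List.max? (PySem.Set.ofList ((PySem.List.pyRange 1 (L + 1) 1).filter p))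
            (fun x => x) with
          | some m => m
          | none => 1) + 1) 1).foldl
      (bstep (PySem.Set.ofList ((PySem.List.pyRange 1 (L + 1) 1).filter p)))
      (1, true, [(1, 1)])).2.2 := by
  set bs := (PySem.List.pyRange 1 (L + 1) 1).filter p with hbs
  have hpw : bs.Pairwise (· < ·) := (PySem.List.pairwise_lt_pyRange_one 1 (L + 1)).filter p
  have hnd : bs.Nodup := hpw.imp (fun h => ne_of_lt h)
  have hofl : PySem.Set.ofList bs = bs := PySem.Set.ofList_eq_self_of_nodup bs hnd
  rw [hofl]
  have hmembs : ∀ r, r ∈ bs ↔ (1 ≤ r ∧ r < L + 1 ∧ p r = true) := by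
    intro r
    rw [hbs, List.mem_filter, PySem.List.mem_pyRange_one]
    tauto
  cases hmax : PySem.List.max? bs (fun x => x) with
  | none =>
    have hbsnil : bs = [] := (PySem.List.max?_eq_none_iff bs (fun x => x)).mp hmax
    rw [hbsnil]
    norm_num [PySem.List.pyRange_one_eq_nil]
  | some M =>
    have hMmem : M ∈ bs := PySem.List.max?_mem hmax
    have hMub : ∀ r ∈ bs, r ≤ M := PySem.List.max?_isMax hmax
    have hL1 : 1 ≤ L := by have := (hmembs M).mp hMmem; omega
    have hsplit : PySem.List.pyRange 1 (L + 1) 1 = 1 :: PySem.List.pyRange 2 (L + 1) 1 := by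
      have := PySem.List.pyRange_one_cons (by omega : (1 : Int) < L + 1)
      norm_num at this
      exact this
    set bs' := (PySem.List.pyRange 2 (L + 1) 1).filter p with hbs'
    have hbseq : bs = if p 1 then 1 :: bs' else bs' := by
      rw [hbs, hsplit, List.filter_cons]
    have hmem' : ∀ r, r ∈ bs' ↔ r ∈ bs ∧ 1 < r := by
      intro r
      rw [hbs', List.mem_filter, PySem.List.mem_pyRange_one, hmembs r]
      constructor
      · rintro ⟨hr, hpr⟩
        exact ⟨⟨by omega, by omega, hpr⟩, by omega⟩
      · rintro ⟨⟨h1, h2, h3⟩, h4⟩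
        exact ⟨by omega, h3⟩
    have hpw' : bs'.Pairwise (· < ·) := (PySem.List.pairwise_lt_pyRange_one 2 (L + 1)).filter p
    have hApre : bs.foldl astep ((1, 1), [(1, 1)]) = bs'.foldl astep ((1, 1), [(1, 1)]) := by
      rw [hbseq]
      split_ifs with h
      · rw [List.foldl_cons, astep_one]
      · rfl
    rw [hApre]
    by_cases hbe : bs' = []
    · have hM1 : M = 1 := by
        rw [hbseq, hbe] at hMmem
        split_ifs at hMmem with h
        · simpa using hMmem
        · simp at hMmem
      rw [hbe, hM1]
      norm_num [PySem.List.pyRange_one_eq_nil]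
    · have hMge2 : 2 ≤ M := by
        obtain ⟨r, hr⟩ := List.exists_mem_of_ne_nil bs' hbe
        have h1 := (hmem' r).mp hr
        have h2 := hMub r h1.1
        omega
      have hMmem' : M ∈ bs' := (hmem' M).mpr ⟨hMmem, by omega⟩
      have hmain := main_lemma bs bs' 1 true [(1, 1)] M hpw' hmem'
        (fun h => nomatch h) (by omega) (fun h => absurd h hbe)
        (fun _ => ⟨hMmem', fun r hr => hMub r ((hmem' r).mp hr).1⟩)
      norm_num at hmain ⊢
      exact hmain

-- ===== VERDICT (by name: the statement is the Claim_ definition above) =====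
theorem solve_spec : Claim_equal_solve := by
  intro n _
  exact top_eq _ _ (Int.natCast_nonneg _)
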